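-- pv_equiv track=rewrite | github.com/jfisteus/mailst | mailst/main.py | _uncapitalize
-- ===== SOURCE A (Python) =====
-- def _uncapitalize(name):
--     """From NAME SURNAME returns Name Surname"""
--     names = [n.swapcase().capitalize() for n in name.split(" ")]
--     for i in range(0, len(names)):
--         parts = names[i].split("-")
--         for j in range(1, len(parts)):
--             parts[j] = parts[j].capitalize()
--         names[i] = "-".join(parts)
--     return " ".join(names).strip()
-- ===== SOURCE B (Python) =====
-- def _uncapitalize(name):
--     """From NAME SURNAME returns Name Surname"""
--     out = []
--     start = True  # True at the start of each ' '/'-'-delimited token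
--     for ch in name:
--         if ch == ' ' or ch == '-':
--             out.append(ch)
--             start = True
--         else:
--             out.append(ch.upper() if start else ch.lower())
--             start = False
--     return ''.join(out).strip()
-- ===== Notes on version B (the rewrite author's own statement) =====
-- stated objective: alternative
-- what changed: Replaces A's split-on-space pass, per-token swapcase+capitalize, inner split-on-hyphen loop and two joins by a single stateful left-to-right scan that upper-cases the character starting each ' '/'-'-delimited token and lower-cases the rest, then strips.
import Mathlib
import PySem

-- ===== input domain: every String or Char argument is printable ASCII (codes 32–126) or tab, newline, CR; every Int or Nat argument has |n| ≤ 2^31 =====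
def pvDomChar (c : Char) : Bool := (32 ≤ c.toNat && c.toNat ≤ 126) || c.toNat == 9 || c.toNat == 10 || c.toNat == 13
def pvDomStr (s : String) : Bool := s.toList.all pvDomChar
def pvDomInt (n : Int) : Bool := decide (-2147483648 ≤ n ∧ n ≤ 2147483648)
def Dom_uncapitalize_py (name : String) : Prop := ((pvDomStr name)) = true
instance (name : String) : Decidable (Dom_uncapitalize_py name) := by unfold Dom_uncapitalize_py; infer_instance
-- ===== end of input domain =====

-- B replaces A's split-on-space / per-token split-on-hyphen / capitalize / join passes by one
-- stateful left-to-right scan over the characters (objective: alternative; same return value).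

-- ===== PORT A =====
-- hand port of str.swapcase() at the character level; exact on the ASCII domain
def pvSwapChar (c : Char) : Char :=
  if PySem.Chars.isupper c then PySem.Chars.lowerChar c
  else if PySem.Chars.islower c then PySem.Chars.upperChar c
  else c

-- s.swapcase(): swap the case of every character (exact on ASCII)
def pvSwapcase (s : List Char) : List Char := s.map pvSwapChar

-- s.capitalize(): first character upper-cased, the rest lower-cased (exact on ASCII,
-- where Python's title-casing of the first character is plain upper-casing)
def pvCapitalize : List Char → List Char
  | [] => []
  | c :: cs => PySem.Chars.upperChar c :: cs.map PySem.Chars.lowerChar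

def uncapitalize_py (name : String) : String :=
  -- names = [n.swapcase().capitalize() for n in name.split(" ")]
  let names := (PySem.Chars.splitOn name.toList [' ']).map (fun n => pvCapitalize (pvSwapcase n))
  -- for i in range(0, len(names)): parts = names[i].split("-");
  --   parts[j] = parts[j].capitalize() for j in range(1, len(parts)); names[i] = "-".join(parts)
  let names := names.map (fun t =>
    match PySem.Chars.splitOn t ['-'] with
    | [] => PySem.Chars.join ['-'] []
    | p :: ps => PySem.Chars.join ['-'] (p :: ps.map pvCapitalize))
  -- return " ".join(names).strip()
  String.ofList (PySem.Chars.strip (PySem.Chars.join [' '] names))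

-- ===== PORT B =====
-- single pass; `start` is True exactly at the start of each ' '/'-'-delimited token
def pvScan (start : Bool) : List Char → List Char
  | [] => []
  | c :: cs =>
    if c = ' ' ∨ c = '-' then c :: pvScan true cs
    else (if start then PySem.Chars.upperChar c else PySem.Chars.lowerChar c) :: pvScan false cs

def uncapitalize_py_alt (name : String) : String :=
  String.ofList (PySem.Chars.strip (pvScan true name.toList))

-- ===== PRECONDITION & SPEC =====
def Spec_uncapitalize_py (name : String) (out : String) : Prop := out = uncapitalize_py_alt name
instance (name : String) (out : String) : Decidable (Spec_uncapitalize_py name out) := by unfold Spec_uncapitalize_py; infer_instance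

-- ===== CLAIM (what is proved, stated in full; the proofs are below) =====
def Claim_equal_uncapitalize_py : Prop := ∀ (name : String), Dom_uncapitalize_py name → Spec_uncapitalize_py name (uncapitalize_py name)

-- ===== LEMMAS AND PROOFS =====

-- character-level case facts
theorem pvIsupper_iff (c : Char) : PySem.Chars.isupper c = true ↔ 65 ≤ c.toNat ∧ c.toNat ≤ 90 := by
  simp [PySem.Chars.isupper, Char.le_def, UInt32.le_iff_toNat_le]

theorem pvIslower_iff (c : Char) : PySem.Chars.islower c = true ↔ 97 ≤ c.toNat ∧ c.toNat ≤ 122 := by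
  simp [PySem.Chars.islower, Char.le_def, UInt32.le_iff_toNat_le]

theorem pvToNat_inj {a b : Char} (h : a.toNat = b.toNat) : a = b := by
  apply Char.ext; exact UInt32.toNat_inj.mp h

theorem pvToNat_ofNat (n : Nat) (h : n < 55296) : (Char.ofNat n).toNat = n := by
  rw [Char.toNat_ofNat, if_pos (Or.inl h)]

theorem pvLower_id (c : Char) (h : PySem.Chars.isupper c = false) : PySem.Chars.lowerChar c = c := by
  rw [PySem.Chars.lowerChar, if_neg (by simp [h])]

theorem pvUpper_id (c : Char) (h : PySem.Chars.islower c = false) : PySem.Chars.upperChar c = c := by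
  rw [PySem.Chars.upperChar, if_neg (by simp [h])]

theorem pvLowerChar_toNat (c : Char) (h : PySem.Chars.isupper c = true) :
    (PySem.Chars.lowerChar c).toNat = c.toNat + 32 := by
  have hb := (pvIsupper_iff c).mp h
  rw [PySem.Chars.lowerChar, if_pos h, pvToNat_ofNat _ (by omega)]

theorem pvUpperChar_toNat (c : Char) (h : PySem.Chars.islower c = true) :
    (PySem.Chars.upperChar c).toNat = c.toNat - 32 := by
  have hb := (pvIslower_iff c).mp h
  rw [PySem.Chars.upperChar, if_pos h, pvToNat_ofNat _ (by omega)]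

theorem pvNotLower (c : Char) (h : ¬ (97 ≤ c.toNat ∧ c.toNat ≤ 122)) : PySem.Chars.islower c = false := by
  cases hx : PySem.Chars.islower c
  · rfl
  · exact absurd ((pvIslower_iff c).mp hx) h

theorem pvNotUpper (c : Char) (h : ¬ (65 ≤ c.toNat ∧ c.toNat ≤ 90)) : PySem.Chars.isupper c = false := by
  cases hx : PySem.Chars.isupper c
  · rfl
  · exact absurd ((pvIsupper_iff c).mp hx) h

theorem pvUpper_lower (c : Char) : PySem.Chars.upperChar (PySem.Chars.lowerChar c) = PySem.Chars.upperChar c := by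
  by_cases hu : PySem.Chars.isupper c = true
  · have hb := (pvIsupper_iff c).mp hu
    have h1 := pvLowerChar_toNat c hu
    have h2 : PySem.Chars.islower (PySem.Chars.lowerChar c) = true := (pvIslower_iff _).mpr (by omega)
    have h3 : PySem.Chars.islower c = false := pvNotLower c (by omega)
    apply pvToNat_inj
    rw [pvUpperChar_toNat _ h2, h1, pvUpper_id c h3]
    omega
  · rw [pvLower_id c (by simpa using hu)]

theorem pvLower_lower (c : Char) : PySem.Chars.lowerChar (PySem.Chars.lowerChar c) = PySem.Chars.lowerChar c := by
  by_cases hu : PySem.Chars.isupper c = true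
  · have hb := (pvIsupper_iff c).mp hu
    have h1 := pvLowerChar_toNat c hu
    exact pvLower_id _ (pvNotUpper _ (by omega))
  · have h := pvLower_id c (by simpa using hu)
    rw [h, h]

theorem pvUpper_upper (c : Char) : PySem.Chars.upperChar (PySem.Chars.upperChar c) = PySem.Chars.upperChar c := by
  by_cases hl : PySem.Chars.islower c = true
  · have hb := (pvIslower_iff c).mp hl
    have h1 := pvUpperChar_toNat c hl
    exact pvUpper_id _ (pvNotLower _ (by omega))
  · have h := pvUpper_id c (by simpa using hl)
    rw [h, h]

theorem pvLower_upper (c : Char) : PySem.Chars.lowerChar (PySem.Chars.upperChar c) = PySem.Chars.lowerChar c := by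
  by_cases hl : PySem.Chars.islower c = true
  · have hb := (pvIslower_iff c).mp hl
    have h1 := pvUpperChar_toNat c hl
    have h2 : PySem.Chars.isupper (PySem.Chars.upperChar c) = true := (pvIsupper_iff _).mpr (by omega)
    have h3 : PySem.Chars.isupper c = false := pvNotUpper c (by omega)
    apply pvToNat_inj
    rw [pvLowerChar_toNat _ h2, h1, pvLower_id c h3]
    omega
  · rw [pvUpper_id c (by simpa using hl)]

theorem pvUpper_swap (c : Char) : PySem.Chars.upperChar (pvSwapChar c) = PySem.Chars.upperChar c := by
  unfold pvSwapChar
  split_ifs with h1 h2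
  · exact pvUpper_lower c
  · exact pvUpper_upper c
  · rfl

theorem pvLower_swap (c : Char) : PySem.Chars.lowerChar (pvSwapChar c) = PySem.Chars.lowerChar c := by
  unfold pvSwapChar
  split_ifs with h1 h2
  · exact pvLower_lower c
  · exact pvLower_upper c
  · rfl

theorem pvLower_eq_sep (c s : Char) (hs : s = ' ' ∨ s = '-') :
    (PySem.Chars.lowerChar c = s) ↔ c = s := by
  constructor
  · intro h
    by_cases hu : PySem.Chars.isupper c = true
    · exfalso
      have ht := congrArg Char.toNat h
      rw [pvLowerChar_toNat c hu] at ht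
      have hb := (pvIsupper_iff c).mp hu
      rcases hs with rfl | rfl
      · have h32 : (' ' : Char).toNat = 32 := by decide
        omega
      · have h45 : ('-' : Char).toNat = 45 := by decide
        omega
    · rwa [pvLower_id c (by simpa using hu)] at h
  · intro h
    subst h
    rcases hs with rfl | rfl <;> exact pvLower_id _ (by decide)

theorem pvUpper_eq_sep (c s : Char) (hs : s = ' ' ∨ s = '-') :
    (PySem.Chars.upperChar c = s) ↔ c = s := by
  constructor
  · intro h
    by_cases hl : PySem.Chars.islower c = true
    · exfalso
      have ht := congrArg Char.toNat h
      rw [pvUpperChar_toNat c hl] at ht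
      have hb := (pvIslower_iff c).mp hl
      rcases hs with rfl | rfl
      · have h32 : (' ' : Char).toNat = 32 := by decide
        omega
      · have h45 : ('-' : Char).toNat = 45 := by decide
        omega
    · rwa [pvUpper_id c (by simpa using hl)] at h
  · intro h
    subst h
    rcases hs with rfl | rfl <;> exact pvUpper_id _ (by decide)

-- list-level facts about capitalize/swapcase
theorem pvCap_swap (n : List Char) : pvCapitalize (pvSwapcase n) = pvCapitalize n := by
  cases n with
  | nil => rfl
  | cons c cs =>
    simp only [pvSwapcase, List.map_cons, pvCapitalize, pvUpper_swap, List.map_map]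
    congr 1
    exact List.map_congr_left (fun x _ => pvLower_swap x)

theorem pvCap_lower (p : List Char) : pvCapitalize (p.map PySem.Chars.lowerChar) = pvCapitalize p := by
  cases p with
  | nil => rfl
  | cons c cs =>
    simp only [List.map_cons, pvCapitalize, pvUpper_lower, List.map_map]
    congr 1
    exact List.map_congr_left (fun x _ => pvLower_lower x)

-- PySem.Chars.splitOn on a one-character separator is List.splitOn
theorem pvSplitOnP_ne_nil {α : Type} (q : α → Bool) : ∀ (l : List α), List.splitOnP q l ≠ [] := by
  intro l
  induction l with
  | nil => simp [List.splitOnP_nil]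
  | cons a t ih =>
    rw [List.splitOnP_cons]
    split_ifs
    · simp
    · cases h : List.splitOnP q t with
      | nil => exact absurd h ih
      | cons x xs => simp

theorem pvMem_splitOnP {α : Type} (q : α → Bool) :
    ∀ (l : List α) (p : List α), p ∈ List.splitOnP q l → ∀ x ∈ p, q x = false ∧ x ∈ l := by
  intro l
  induction l with
  | nil =>
    intro p hp x hx
    simp [List.splitOnP_nil] at hp
    subst hp
    simp at hx
  | cons a t ih =>
    intro p hp x hx
    rw [List.splitOnP_cons] at hp
    by_cases hqa : q a = true
    · rw [if_pos hqa] at hp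
      rcases List.mem_cons.mp hp with rfl | hp'
      · simp at hx
      · have := ih p hp' x hx
        exact ⟨this.1, List.mem_cons_of_mem a this.2⟩
    · rw [if_neg hqa] at hp
      cases hsp : List.splitOnP q t with
      | nil => exact absurd hsp (pvSplitOnP_ne_nil q t)
      | cons h0 t0 =>
        rw [hsp] at hp
        simp only [List.modifyHead] at hp
        rcases List.mem_cons.mp hp with rfl | hp'
        · rcases List.mem_cons.mp hx with rfl | hx'
          · exact ⟨by simpa using hqa, List.mem_cons_self⟩
          · have := ih h0 (by rw [hsp]; exact List.mem_cons_self) x hx'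
            exact ⟨this.1, List.mem_cons_of_mem a this.2⟩
        · have := ih p (by rw [hsp]; exact List.mem_cons_of_mem h0 hp') x hx
          exact ⟨this.1, List.mem_cons_of_mem a this.2⟩

theorem pvGo_eq (c : Char) : ∀ (fuel : Nat) (l cur : List Char) (acc : List (List Char)), l.length < fuel →
    PySem.Chars.splitOn.go [c] fuel l cur acc
      = acc.reverse ++ List.modifyHead (cur.reverse ++ ·) (l.splitOn c) := by
  intro fuel
  induction fuel with
  | zero => intro l cur acc h; omega
  | succ n ih =>
    intro l cur acc h
    cases l with
    | nil =>
      rw [PySem.Chars.splitOn.go]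
      simp [List.splitOn, List.splitOnP_nil]
      omega
    | cons a rest =>
      rw [PySem.Chars.splitOn.go]
      by_cases hca : c = a
      · subst hca
        rw [if_pos (by simp [List.isPrefixOf])]
        simp only [List.length_cons, List.length_nil, Nat.zero_add, List.drop_succ_cons, List.drop_zero]
        rw [ih rest [] _ (by simpa using Nat.lt_of_succ_lt_succ h)]
        have hsp : (c :: rest).splitOn c = [] :: rest.splitOn c := by
          simp [List.splitOn, List.splitOnP_cons]
        rw [hsp]
        cases hr : rest.splitOn c with
        | nil => exact absurd (by simpa [List.splitOn] using hr) (pvSplitOnP_ne_nil _ rest)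
        | cons h0 t0 => simp
      · rw [if_neg (by simp [List.isPrefixOf]; exact hca)]
        rw [ih rest (a :: cur) acc (by simpa using Nat.lt_of_succ_lt_succ h)]
        have hac : (a == c) = false := by
          simp only [beq_eq_false_iff_ne, ne_eq]
          exact fun hh => hca hh.symm
        have hsp : (a :: rest).splitOn c = List.modifyHead (a :: ·) (rest.splitOn c) := by
          simp [List.splitOn, List.splitOnP_cons, hac]
        rw [hsp]
        cases hr : rest.splitOn c with
        | nil => exact absurd (by simpa [List.splitOn] using hr) (pvSplitOnP_ne_nil _ rest)
        | cons h0 t0 => simp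

theorem pvSplit_eq (l : List Char) (c : Char) :
    PySem.Chars.splitOn l [c] = l.splitOn c := by
  rw [PySem.Chars.splitOn, pvGo_eq c (l.length + 1) l [] [] (by omega)]
  cases h : l.splitOn c with
  | nil => exact absurd (by simpa [List.splitOn] using h) (pvSplitOnP_ne_nil _ l)
  | cons h0 t0 => simp

-- capitalize / lower-casing pushed through a hyphen split
theorem pvLower_split : ∀ (u : List Char),
    List.splitOnP (fun x => x == '-') (u.map PySem.Chars.lowerChar)
      = (List.splitOnP (fun x => x == '-') u).map (List.map PySem.Chars.lowerChar) := by
  intro u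
  induction u with
  | nil => simp [List.splitOnP_nil]
  | cons c t ih =>
    simp only [List.map_cons, List.splitOnP_cons]
    by_cases hc : c = '-'
    · rw [if_pos (by simp [(pvLower_eq_sep c '-' (Or.inr rfl)).mpr hc]), if_pos (by simp [hc]), ih]
      simp
    · rw [if_neg (by simp only [beq_iff_eq]; exact fun hh => hc ((pvLower_eq_sep c '-' (Or.inr rfl)).mp hh)),
         if_neg (by simp [hc]), ih]
      cases hr : List.splitOnP (fun x => x == '-') t with
      | nil => exact absurd hr (pvSplitOnP_ne_nil _ t)
      | cons h0 t0 => simp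

theorem pvCap_split (t : List Char) :
    (pvCapitalize t).splitOn '-'
      = match t.splitOn '-' with
        | [] => []
        | p :: ps => pvCapitalize p :: ps.map (List.map PySem.Chars.lowerChar) := by
  cases t with
  | nil => simp [pvCapitalize, List.splitOn, List.splitOnP_nil]
  | cons c cs =>
    simp only [pvCapitalize, List.splitOn, List.splitOnP_cons]
    by_cases hc : c = '-'
    · have hup : PySem.Chars.upperChar c = '-' := (pvUpper_eq_sep c '-' (Or.inr rfl)).mpr hc
      rw [if_pos (by simp [hup]), if_pos (by simp [hc]), pvLower_split cs]
    · have hup : ¬ PySem.Chars.upperChar c = '-' :=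
        fun hh => hc ((pvUpper_eq_sep c '-' (Or.inr rfl)).mp hh)
      rw [if_neg (by simp only [beq_iff_eq]; exact hup), if_neg (by simp [hc]), pvLower_split cs]
      cases hr : List.splitOnP (fun x => x == '-') cs with
      | nil => exact absurd hr (pvSplitOnP_ne_nil _ cs)
      | cons h0 t0 => simp

-- the scan distributes over separators
theorem pvScan_append (s : Char) (hs : s = ' ' ∨ s = '-') :
    ∀ (xs : List Char) (b : Bool) (ys : List Char),
      pvScan b (xs ++ s :: ys) = pvScan b xs ++ s :: pvScan true ys := by
  intro xs
  induction xs with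
  | nil =>
    intro b ys
    simp [pvScan, hs.elim (fun h => Or.inl h) (fun h => Or.inr h)]
  | cons c t ih =>
    intro b ys
    by_cases hc : c = ' ' ∨ c = '-'
    · simp only [List.cons_append, pvScan, if_pos hc, ih]
    · simp only [List.cons_append, pvScan, if_neg hc, ih]

theorem pvScan_join (s : Char) (hs : s = ' ' ∨ s = '-') :
    ∀ (ts : List (List Char)),
      pvScan true (PySem.Chars.join [s] ts) = PySem.Chars.join [s] (ts.map (pvScan true)) := by
  intro ts
  induction ts with
  | nil => simp [PySem.Chars.join_nil, pvScan]
  | cons t r ih =>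
    cases r with
    | nil => simp [PySem.Chars.join_singleton]
    | cons t' r' =>
      rw [PySem.Chars.join_cons_cons, List.append_assoc, List.singleton_append,
         pvScan_append s hs, ih]
      simp [PySem.Chars.join_cons_cons]

theorem pvScan_false_eq : ∀ (p : List Char), (∀ x ∈ p, x ≠ ' ' ∧ x ≠ '-') →
    pvScan false p = p.map PySem.Chars.lowerChar := by
  intro p
  induction p with
  | nil => intro _; rfl
  | cons c t ih =>
    intro h
    have hc := h c List.mem_cons_self
    rw [pvScan, if_neg (by tauto), List.map_cons, ih (fun x hx => h x (List.mem_cons_of_mem c hx))]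
    simp

theorem pvScan_true_eq (p : List Char) (h : ∀ x ∈ p, x ≠ ' ' ∧ x ≠ '-') :
    pvScan true p = pvCapitalize p := by
  cases p with
  | nil => rfl
  | cons c t =>
    have hc := h c List.mem_cons_self
    rw [pvScan, if_neg (by tauto), pvCapitalize,
       pvScan_false_eq t (fun x hx => h x (List.mem_cons_of_mem c hx))]
    simp

-- per-token: A's token transform is B's scan
theorem pvTok (n : List Char) (hn : ∀ x ∈ n, x ≠ ' ') :
    (match PySem.Chars.splitOn (pvCapitalize (pvSwapcase n)) ['-'] with
     | [] => PySem.Chars.join ['-'] []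
     | p :: ps => PySem.Chars.join ['-'] (p :: ps.map pvCapitalize))
    = pvScan true n := by
  rw [pvCap_swap, pvSplit_eq, pvCap_split]
  cases hsp : n.splitOn '-' with
  | nil => exact absurd (by simpa [List.splitOn] using hsp) (pvSplitOnP_ne_nil _ n)
  | cons p ps =>
    have hparts : ∀ q ∈ p :: ps, ∀ x ∈ q, x ≠ ' ' ∧ x ≠ '-' := by
      intro q hq x hx
      have hm := pvMem_splitOnP (fun y => y == '-') n q
        (by rw [show List.splitOnP (fun y => y == '-') n = n.splitOn '-' from rfl, hsp]; exact hq) x hx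
      exact ⟨hn x hm.2, by simpa using hm.1⟩
    have hscan : pvScan true n = PySem.Chars.join ['-'] ((p :: ps).map (pvScan true)) := by
      conv_lhs => rw [← List.intercalate_splitOn n '-', hsp]
      exact pvScan_join '-' (Or.inr rfl) (p :: ps)
    rw [hscan]
    simp only [List.map_cons, List.map_map]
    have htail : List.map (pvCapitalize ∘ List.map PySem.Chars.lowerChar) ps
        = List.map (pvScan true) ps := by
      apply List.map_congr_left
      intro q hq
      simp only [Function.comp_apply]
      rw [pvCap_lower q, ← pvScan_true_eq q (hparts q (List.mem_cons_of_mem p hq))]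
    rw [htail, pvScan_true_eq p (hparts p List.mem_cons_self)]

theorem pvMain (cs : List Char) :
    PySem.Chars.join [' ']
      (((PySem.Chars.splitOn cs [' ']).map (fun n => pvCapitalize (pvSwapcase n))).map (fun t =>
        match PySem.Chars.splitOn t ['-'] with
        | [] => PySem.Chars.join ['-'] []
        | p :: ps => PySem.Chars.join ['-'] (p :: ps.map pvCapitalize)))
      = pvScan true cs := by
  rw [pvSplit_eq, List.map_map]
  have h1 : ((cs.splitOn ' ').map
      ((fun t =>
        match PySem.Chars.splitOn t ['-'] with
        | [] => PySem.Chars.join ['-'] []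
        | p :: ps => PySem.Chars.join ['-'] (p :: ps.map pvCapitalize)) ∘ (fun n => pvCapitalize (pvSwapcase n))))
      = (cs.splitOn ' ').map (pvScan true) := by
    apply List.map_congr_left
    intro n hn
    simp only [Function.comp_apply]
    apply pvTok
    intro x hx
    have hm := pvMem_splitOnP (fun y => y == ' ') cs n
      (by rw [show List.splitOnP (fun y => y == ' ') cs = cs.splitOn ' ' from rfl]; exact hn) x hx
    simpa using hm.1
  rw [h1, ← pvScan_join ' ' (Or.inl rfl)]
  conv_rhs => rw [← List.intercalate_splitOn cs ' ']
  rfl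


-- ===== VERDICT (by name: the statement is the Claim_ definition above) =====
theorem uncapitalize_py_spec : Claim_equal_uncapitalize_py := by
  intro name _
  unfold Spec_uncapitalize_py uncapitalize_py uncapitalize_py_alt
  rw [← pvMain name.toList]
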